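-- pv_equiv track=rewrite | github.com/futurediffusion/MangaPanelizer | nodes/comic_panel_templates.py | parse_layout_sequence
-- ===== SOURCE A (Python) =====
-- from typing import Iterable, List, Optional, Sequence, Tuple
--
-- def safe_int(value: str, default: int = 1) -> int:
--     """Parse an integer from text, falling back gracefully."""
--     try:
--         return max(int(value), 1)
--     except (TypeError, ValueError):
--         return default
--
-- def parse_layout_sequence(sequence: str) -> tuple[List[int], List[bool]]:
--     """Parse a sequence string (e.g. "1/23") into counts and diagonal flags."""
--     counts: List[int] = []
--     diagonals: List[bool] = []
--     diagonal_pending = False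
--
--     for char in sequence:
--         if char.isdigit():
--             counts.append(safe_int(char))
--
--             if len(counts) > 1 and len(diagonals) < len(counts) - 1:
--                 diagonals.extend([False] * (len(counts) - 1 - len(diagonals)))
--
--             if diagonal_pending and len(counts) >= 2:
--                 diagonals[len(counts) - 2] = True
--                 diagonal_pending = False
--         elif char == "/":
--             if counts:
--                 diagonal_pending = True
--         else:
--             diagonal_pending = False
--
--     if counts and len(diagonals) < len(counts) - 1:
--         diagonals.extend([False] * (len(counts) - 1 - len(diagonals)))
--
--     if not counts:
--         counts = [1]
--         diagonals = []
--
--     return counts, diagonals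
-- ===== SOURCE B (Python) =====
-- def safe_int(value: str, default: int = 1) -> int:
--     """Parse an integer from text, falling back gracefully."""
--     try:
--         return max(int(value), 1)
--     except (TypeError, ValueError):
--         return default
--
--
-- def parse_layout_sequence(sequence: str) -> tuple:
--     """Index-table version: counts come from the digit characters themselves,
--     and a diagonal flag for each non-first digit is simply whether the character
--     immediately before it is '/'."""
--     indexed = [(i, ch) for i, ch in enumerate(sequence) if ch.isdigit()]
--     if not indexed:
--         return [1], []
--     counts = [safe_int(ch) for _, ch in indexed]
--     diagonals = [sequence[p - 1] == "/" for p, _ in indexed[1:]]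
--     return counts, diagonals
-- ===== Notes on version B (the rewrite author's own statement) =====
-- stated objective: simpler
-- what changed: Replaces A's single-pass state machine (pending-diagonal flag, conditional extend-with-False fill, in-place flag assignment) by an index table of digit positions built once, from which counts and diagonals are produced as two independent comprehensions: each diagonal flag just tests whether a slash character immediately precedes the corresponding non-first digit.
import Mathlib
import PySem

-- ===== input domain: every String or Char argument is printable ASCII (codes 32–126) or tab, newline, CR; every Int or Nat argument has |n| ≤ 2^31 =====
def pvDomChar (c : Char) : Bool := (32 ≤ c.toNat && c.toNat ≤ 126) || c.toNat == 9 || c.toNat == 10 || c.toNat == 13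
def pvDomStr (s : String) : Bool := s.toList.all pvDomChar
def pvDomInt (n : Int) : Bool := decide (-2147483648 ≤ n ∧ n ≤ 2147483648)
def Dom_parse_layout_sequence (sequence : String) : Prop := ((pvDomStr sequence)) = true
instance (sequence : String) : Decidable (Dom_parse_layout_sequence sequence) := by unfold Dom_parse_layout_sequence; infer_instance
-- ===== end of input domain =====

-- B replaces A's pending-flag/extend-fill state machine by an index table of the digit
-- positions and two independent comprehensions (objective: simpler decomposition).

-- ===== PORT A =====
-- safe_int(value, default=1): int(value) raises ValueError exactly where PySem.Int.ofStr? is none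
def pls_safe_int (value : String) (default : Int) : Int :=
  match PySem.Int.ofStr? value with
  | some n => max n 1
  | none => default

-- the body of A's `for char in sequence` loop; state = (counts, diagonals, diagonal_pending)
def plsStep (st : List Int × List Bool × Bool) (c : Char) : List Int × List Bool × Bool :=
  let counts := st.1
  let diagonals := st.2.1
  let pending := st.2.2
  if PySem.Chars.isdigit c then
    let counts := counts ++ [pls_safe_int (String.ofList [c]) 1]
    let diagonals :=
      if counts.length > 1 ∧ diagonals.length < counts.length - 1 then
        diagonals ++ List.replicate (counts.length - 1 - diagonals.length) false
      else diagonals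
    -- `diagonals[len(counts)-2] = True`: the guard puts the index in range, List.set is exact there
    if pending = true ∧ counts.length ≥ 2 then
      (counts, diagonals.set (counts.length - 2) true, false)
    else (counts, diagonals, pending)
  else if c == '/' then
    (counts, diagonals, if counts ≠ [] then true else pending)
  else (counts, diagonals, false)

def plsCore (cs : List Char) : List Int × List Bool :=
  let st := cs.foldl plsStep ([], [], false)
  let counts := st.1
  let diagonals := st.2.1
  let diagonals :=
    if counts ≠ [] ∧ diagonals.length < counts.length - 1 then
      diagonals ++ List.replicate (counts.length - 1 - diagonals.length) false
    else diagonals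
  if counts = [] then ([1], []) else (counts, diagonals)

def parse_layout_sequence (sequence : String) : List Int × List Bool :=
  plsCore sequence.toList

-- ===== PORT B =====
-- `indexed = [(i, ch) for i, ch in enumerate(sequence) if ch.isdigit()]`, then two comprehensions;
-- `sequence[p - 1]` is always in range (p is the position of a non-first digit), so pyGet? never
-- returns none here and Option.any `== '/'` is exactly `sequence[p - 1] == "/"`.
def plsAltCore (cs : List Char) : List Int × List Bool :=
  let indexed := (PySem.List.enumerate cs).filter (fun ic => PySem.Chars.isdigit ic.2)
  if indexed = [] then ([1], [])
  else
    (indexed.map (fun ic => pls_safe_int (String.ofList [ic.2]) 1),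
     (indexed.drop 1).map (fun ic => (PySem.List.pyGet? cs (ic.1 - 1)).any (fun c => c == '/')))

def parse_layout_sequence_alt (sequence : String) : List Int × List Bool :=
  plsAltCore sequence.toList

-- ===== PRECONDITION & SPEC =====
def Spec_parse_layout_sequence (sequence : String) (out : List Int × List Bool) : Prop := out = parse_layout_sequence_alt sequence
instance (sequence : String) (out : List Int × List Bool) : Decidable (Spec_parse_layout_sequence sequence out) := by unfold Spec_parse_layout_sequence; infer_instance

-- ===== CLAIM (what is proved, stated in full; the proofs are below) =====
def Claim_equal_parse_layout_sequence : Prop := ∀ (sequence : String), Dom_parse_layout_sequence sequence → Spec_parse_layout_sequence sequence (parse_layout_sequence sequence)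

-- ===== LEMMAS AND PROOFS =====

-- common characterisation: for each digit after the first, the pair (count, flag);
-- `pending` is the flag the NEXT digit would receive (in A: diagonal_pending once counts ≠ []).
def goFlags (pending : Bool) (cs : List Char) : List (Int × Bool) :=
  match cs with
  | [] => []
  | c :: rest =>
    if PySem.Chars.isdigit c then
      (pls_safe_int (String.ofList [c]) 1, pending) :: goFlags false rest
    else goFlags (c == '/') rest

-- both programs compute this function of the character list
def charA (cs : List Char) : List Int × List Bool :=
  match cs with
  | [] => ([1], [])
  | c :: rest =>
    if PySem.Chars.isdigit c then
      (pls_safe_int (String.ofList [c]) 1 :: (goFlags false rest).map Prod.fst,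
       (goFlags false rest).map Prod.snd)
    else charA rest

lemma isdigit_ne_slash (c : Char) (h : PySem.Chars.isdigit c = true) : (c == '/') = false := by
  simp [PySem.Chars.isdigit, Char.le_def] at *
  rintro rfl
  simp at h

lemma stepA_digit (counts : List Int) (diags : List Bool) (pending : Bool) (c : Char)
    (h : PySem.Chars.isdigit c = true) (hne : counts ≠ [])
    (hlen : diags.length + 1 = counts.length) :
    plsStep (counts, diags, pending) c =
      (counts ++ [pls_safe_int (String.ofList [c]) 1], diags ++ [pending], false) := by
  have h1 : 1 ≤ counts.length := by
    cases counts with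
    | nil => exact absurd rfl hne
    | cons a l => simp
  simp only [plsStep, h, if_true]
  have hc : (counts ++ [pls_safe_int (String.ofList [c]) 1]).length > 1 ∧
      diags.length < (counts ++ [pls_safe_int (String.ofList [c]) 1]).length - 1 := by
    simp; omega
  rw [if_pos hc]
  have hrep : (counts ++ [pls_safe_int (String.ofList [c]) 1]).length - 1 - diags.length = 1 := by
    simp; omega
  rw [hrep]
  cases pending with
  | false =>
    rw [if_neg (by simp)]
    simp
  | true =>
    rw [if_pos (by simp; omega)]
    have hidx : (counts ++ [pls_safe_int (String.ofList [c]) 1]).length - 2 = diags.length := by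
      simp; omega
    rw [hidx, List.replicate_one, List.set_append_right _ _ (le_refl _)]
    simp

lemma stepA_nondigit (counts : List Int) (diags : List Bool) (pending : Bool) (c : Char)
    (h : PySem.Chars.isdigit c = false) (hne : counts ≠ []) :
    plsStep (counts, diags, pending) c = (counts, diags, (c == '/')) := by
  simp only [plsStep, h, Bool.false_eq_true, if_false]
  by_cases hc : (c == '/') = true
  · simp [hc, hne]
  · simp at hc
    simp [hc]

lemma loopA (cs : List Char) : ∀ (counts : List Int) (diags : List Bool) (pending : Bool),
    counts ≠ [] → diags.length + 1 = counts.length →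
    ∃ p, List.foldl plsStep (counts, diags, pending) cs =
      (counts ++ (goFlags pending cs).map Prod.fst,
       diags ++ (goFlags pending cs).map Prod.snd, p) := by
  induction cs with
  | nil => intro counts diags pending _ _; exact ⟨pending, by simp [goFlags]⟩
  | cons c rest ih =>
    intro counts diags pending hne hlen
    by_cases h : PySem.Chars.isdigit c = true
    · rw [List.foldl_cons, stepA_digit counts diags pending c h hne hlen]
      obtain ⟨p, hp⟩ := ih (counts ++ [pls_safe_int (String.ofList [c]) 1]) (diags ++ [pending]) false
        (by simp) (by simp; omega)
      refine ⟨p, ?_⟩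
      rw [hp]
      simp [goFlags, h]
    · rw [List.foldl_cons, stepA_nondigit counts diags pending c (by simpa using h) hne]
      obtain ⟨p, hp⟩ := ih counts diags (c == '/') hne hlen
      refine ⟨p, ?_⟩
      rw [hp]
      simp [goFlags, h]

lemma A_eq_charA (cs : List Char) : plsCore cs = charA cs := by
  induction cs with
  | nil => rfl
  | cons c rest ih =>
    by_cases h : PySem.Chars.isdigit c = true
    · have hstep : plsStep ([], [], false) c = ([pls_safe_int (String.ofList [c]) 1], [], false) := by
        simp [plsStep, h]
      obtain ⟨p, hp⟩ := loopA rest [pls_safe_int (String.ofList [c]) 1] [] false (by simp) (by simp)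
      simp only [plsCore, List.foldl_cons, hstep, hp]
      simp [charA, h]
    · have hstep : plsStep ([], [], false) c = ([], [], false) := by
        simp only [plsStep, (by simpa using h : PySem.Chars.isdigit c = false),
          Bool.false_eq_true, if_false]
        by_cases hc : (c == '/') = true <;> simp [hc]
      simp only [plsCore, List.foldl_cons, hstep] at *
      rw [ih]
      simp [charA, h]

lemma B_counts (suf : List Char) : ∀ (s : Int) (pending : Bool),
    ((PySem.List.enumerate suf s).filter (fun ic => PySem.Chars.isdigit ic.2)).map
      (fun ic => pls_safe_int (String.ofList [ic.2]) 1)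
    = (goFlags pending suf).map Prod.fst := by
  induction suf with
  | nil => intro s pending; simp [goFlags]
  | cons c rest ih =>
    intro s pending
    rw [PySem.List.enumerate_cons, List.filter_cons]
    by_cases h : PySem.Chars.isdigit c = true
    · simp only [h, if_true, List.map_cons, goFlags]
      exact congrArg _ (ih (s + 1) false)
    · simp only [goFlags, h]
      exact ih (s + 1) (c == '/')

lemma B_flags (suf : List Char) : ∀ (pre : List Char) (prev : Char),
    ((PySem.List.enumerate suf ((pre.length : Int) + 1)).filter
        (fun ic => PySem.Chars.isdigit ic.2)).map
      (fun ic => (PySem.List.pyGet? (pre ++ prev :: suf) (ic.1 - 1)).any (fun c => c == '/'))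
    = (goFlags (prev == '/') suf).map Prod.snd := by
  induction suf with
  | nil => intro pre prev; simp [goFlags]
  | cons c rest ih =>
    intro pre prev
    rw [PySem.List.enumerate_cons, List.filter_cons]
    have hfull : pre ++ prev :: c :: rest = (pre ++ [prev]) ++ c :: rest := by simp
    have hstart : (pre.length : Int) + 1 + 1 = ((pre ++ [prev]).length : Int) + 1 := by
      simp
    have htail := ih (pre ++ [prev]) c
    rw [← hstart, ← hfull] at htail
    by_cases h : PySem.Chars.isdigit c = true
    · simp only [h, if_true, List.map_cons, goFlags]
      have hhead : PySem.List.pyGet? (pre ++ prev :: c :: rest) ((pre.length : Int) + 1 - 1)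
          = some prev := by
        rw [show (pre.length : Int) + 1 - 1 = (pre.length : Int) by ring]
        exact PySem.List.pyGet?_append_length pre (c :: rest) prev
      rw [isdigit_ne_slash c h] at htail
      simp only [hhead, Option.any_some, htail]
    · simp only [goFlags, h]
      exact htail

lemma enum_filter_nil (pre : List Char) (hpre : pre.all (fun c => !PySem.Chars.isdigit c) = true) :
    ∀ s : Int, (PySem.List.enumerate pre s).filter (fun ic => PySem.Chars.isdigit ic.2) = [] := by
  induction pre with
  | nil => intro s; rfl
  | cons c rest ih =>
    intro s
    simp only [List.all_cons, Bool.and_eq_true, Bool.not_eq_eq_eq_not, Bool.not_true] at hpre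
    rw [PySem.List.enumerate_cons, List.filter_cons]
    simp only [hpre.1]
    exact ih hpre.2 (s + 1)

lemma B_gen (suf : List Char) : ∀ (pre : List Char),
    pre.all (fun c => !PySem.Chars.isdigit c) = true →
    plsAltCore (pre ++ suf) = charA suf := by
  induction suf with
  | nil =>
    intro pre hpre
    simp only [plsAltCore, List.append_nil]
    rw [enum_filter_nil pre hpre 0]
    rfl
  | cons c rest ih =>
    intro pre hpre
    by_cases h : PySem.Chars.isdigit c = true
    · simp only [plsAltCore, PySem.List.enumerate, PySem.List.enumerate_append,
        List.filter_append, enum_filter_nil pre hpre 0, List.nil_append,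
        List.filter_cons, h, if_true]
      rw [if_neg (by simp)]
      simp only [List.map_cons, List.drop_one, List.tail_cons]
      have hcnt := B_counts rest ((0 : Int) + pre.length + 1) false
      have hflg := B_flags rest pre c
      rw [isdigit_ne_slash c h] at hflg
      have hst : (0 : Int) + (pre.length : Int) + 1 = (pre.length : Int) + 1 := by ring
      simp only [hst] at *
      simp [charA, h, hcnt, hflg]
    · have hfull : pre ++ c :: rest = (pre ++ [c]) ++ rest := by simp
      rw [hfull, ih (pre ++ [c]) (by simp_all)]
      simp [charA, h]

lemma B_eq_charA (cs : List Char) : plsAltCore cs = charA cs := by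
  simpa using B_gen cs [] rfl

-- ===== VERDICT (by name: the statement is the Claim_ definition above) =====
theorem parse_layout_sequence_spec : Claim_equal_parse_layout_sequence := by
  intro sequence _
  unfold Spec_parse_layout_sequence parse_layout_sequence parse_layout_sequence_alt
  rw [A_eq_charA, B_eq_charA]
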